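-- pv_equiv track=rewrite | github.com/kanhaiya-gupta/AASX-Digital | src/integration/api/middleware.py | _get_base_path
-- ===== SOURCE A (Python) =====
-- def _get_base_path(path: str) -> str:
--     """Get the base path without parameters."""
--     # Remove path parameters like {workflow_id}
--     parts = path.split('/')
--     base_parts = []
--
--     for part in parts:
--         if part.startswith('{') and part.endswith('}'):
--             base_parts.append('{param}')
--         else:
--             base_parts.append(part)
--
--     return '/'.join(base_parts)
-- ===== SOURCE B (Python) =====
-- def _norm(seg: str) -> str:
--     """Normalize one segment."""
--     if seg.startswith('{') and seg.endswith('}'):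
--         return '{param}'
--     return seg
--
--
-- def _get_base_path(path: str) -> str:
--     """Get the base path without parameters.
--
--     Consumes the path from the right: repeatedly peel off the last segment
--     with rpartition and prepend its normalized form, building the result
--     back-to-front (no parts list, no join)."""
--     out = ''
--     rest = path
--     while '/' in rest:
--         rest, _, seg = rest.rpartition('/')
--         out = '/' + _norm(seg) + out
--     return _norm(rest) + out
-- ===== Notes on version B (the rewrite author's own statement) =====
-- stated objective: alternative
-- what changed: A splits the whole path into a list of segments, loops forward appending normalized segments to a second list, and joins it; B never builds a segment list: it consumes the string right-to-left, repeatedly peeling off the last segment with rpartition and prepending its normalized form, building the output back-to-front.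
import Mathlib
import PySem

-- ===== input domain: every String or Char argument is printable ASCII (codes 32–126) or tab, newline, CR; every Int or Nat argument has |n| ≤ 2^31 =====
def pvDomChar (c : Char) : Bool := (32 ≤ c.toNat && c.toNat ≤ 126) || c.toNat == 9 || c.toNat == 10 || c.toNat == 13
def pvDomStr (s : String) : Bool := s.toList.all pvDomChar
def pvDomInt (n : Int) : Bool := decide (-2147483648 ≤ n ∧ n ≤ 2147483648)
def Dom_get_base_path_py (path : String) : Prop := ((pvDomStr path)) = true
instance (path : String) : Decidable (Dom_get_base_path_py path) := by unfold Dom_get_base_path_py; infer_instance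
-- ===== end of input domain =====

-- B replaces A's split / forward loop / join with a right-to-left rpartition loop that
-- peels off the last segment and prepends it, building the output back-to-front
-- (objective: alternative, same cost).

-- ===== PORT A =====
def get_base_path_py (path : String) : String :=
  -- parts = path.split('/')
  let parts := PySem.Chars.splitOn path.toList ['/']
  -- for part in parts: base_parts.append('{param}' if part.startswith('{') and part.endswith('}') else part)
  let base_parts := parts.foldl
    (fun acc part =>
      if PySem.Chars.startswith part ['{'] && PySem.Chars.endswith part ['}'] then
        acc ++ ["{param}".toList]
      else
        acc ++ [part]) ([] : List (List Char))
  -- return '/'.join(base_parts)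
  String.ofList (PySem.Chars.join ['/'] base_parts)

-- ===== PORT B =====
-- _norm(seg) of Source B
def pvNormB (seg : List Char) : List Char :=
  if PySem.Chars.startswith seg ['{'] && PySem.Chars.endswith seg ['}'] then
    "{param}".toList
  else
    seg

-- the while loop of Source B; the `'/' in rest` guard and rest.rpartition('/') are ported
-- by hand (PySem has no rpartition), exactly, on the reversed string: dropWhile (≠ '/')
-- of the reverse is empty iff '/' ∉ rest (loop exit); otherwise its head is the last '/',
-- its tail re-reversed is rest before the last '/', and the reversed takeWhile is seg.
def get_base_path_py_alt_go (rest : List Char) (out : List Char) : List Char :=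
  match hdw : rest.reverse.dropWhile (fun c => c ≠ '/') with
  | [] =>
    -- '/' not in rest: the loop exits; return _norm(rest) + out
    pvNormB rest ++ out
  | _ :: t =>
    -- '/' in rest: rest.rpartition('/') = (t.reverse, '/', seg) where seg is
    -- everything after the last '/' (the reversed takeWhile on the reversed string)
    get_base_path_py_alt_go t.reverse
      ('/' :: pvNormB ((rest.reverse.takeWhile (fun c => c ≠ '/')).reverse) ++ out)
termination_by rest.length
decreasing_by
  have hle := List.length_dropWhile_le (fun c => c ≠ '/') rest.reverse
  rw [hdw] at hle
  simp only [List.length_cons, List.length_reverse] at hle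
  simp only [List.length_reverse]
  omega

def get_base_path_py_alt (path : String) : String :=
  String.ofList (get_base_path_py_alt_go path.toList [])

-- ===== PRECONDITION & SPEC =====
def Spec_get_base_path_py (path : String) (out : String) : Prop := out = get_base_path_py_alt path
instance (path : String) (out : String) : Decidable (Spec_get_base_path_py path out) := by unfold Spec_get_base_path_py; infer_instance

-- ===== CLAIM =====
def Claim_equal_get_base_path_py : Prop := ∀ (path : String), Dom_get_base_path_py path → Spec_get_base_path_py path (get_base_path_py path)

-- ===== LEMMAS AND PROOFS =====

-- recursive characterization of path.split('/')
def pvSplit (cs : List Char) : List (List Char) :=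
  match h : cs.dropWhile (fun c => c ≠ '/') with
  | [] => [cs.takeWhile (fun c => c ≠ '/')]
  | _ :: r => cs.takeWhile (fun c => c ≠ '/') :: pvSplit r
termination_by cs.length
decreasing_by
  have := List.length_dropWhile_le (fun c => c ≠ '/') cs
  rw [h] at this; simp at this; omega

def pvSplitTail (cs : List Char) : List (List Char) :=
  match cs.dropWhile (fun c => c ≠ '/') with
  | [] => []
  | _ :: r => pvSplit r

lemma pvSplit_eq_cons (cs : List Char) :
    pvSplit cs = cs.takeWhile (fun c => c ≠ '/') :: pvSplitTail cs := by
  rw [pvSplit]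
  unfold pvSplitTail
  cases h : cs.dropWhile (fun c => c ≠ '/') <;> simp

lemma pvSplit_ne_nil (cs : List Char) : pvSplit cs ≠ [] := by
  rw [pvSplit_eq_cons]; simp

lemma pvSplit_no_slash (cs : List Char) (h : '/' ∉ cs) : pvSplit cs = [cs] := by
  have hd : cs.dropWhile (fun c => c ≠ '/') = [] := by
    rw [List.dropWhile_eq_nil_iff]
    intro x hx
    simp only [decide_eq_true_eq, ne_eq]
    intro he; exact h (he ▸ hx)
  have ht : cs.takeWhile (fun c => c ≠ '/') = cs := by
    rw [List.takeWhile_eq_self_iff]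
    intro x hx
    simp only [decide_eq_true_eq, ne_eq]
    intro he; exact h (he ▸ hx)
  rw [pvSplit_eq_cons, ht]
  unfold pvSplitTail
  rw [hd]

lemma pvSplit_append (a b : List Char) :
    pvSplit (a ++ '/' :: b) = pvSplit a ++ pvSplit b := by
  induction a with
  | nil =>
    rw [pvSplit_eq_cons]
    have h1 : (([] : List Char) ++ '/' :: b).takeWhile (fun c => c ≠ '/') = [] := by simp
    have h2 : pvSplitTail (([] : List Char) ++ '/' :: b) = pvSplit b := by
      unfold pvSplitTail; simp
    rw [h1, h2]
    have h3 : pvSplit ([] : List Char) = [[]] := pvSplit_no_slash [] (by simp)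
    rw [h3]; simp
  | cons c a ih =>
    simp only [List.cons_append]
    by_cases hc : c = '/'
    · subst hc
      rw [pvSplit_eq_cons ('/' :: (a ++ '/' :: b)), pvSplit_eq_cons ('/' :: a)]
      have t1 : ('/' :: (a ++ '/' :: b)).takeWhile (fun c => c ≠ '/') = [] := by simp
      have t2 : ('/' :: a).takeWhile (fun c => c ≠ '/') = [] := by simp
      have s1 : pvSplitTail ('/' :: (a ++ '/' :: b)) = pvSplit (a ++ '/' :: b) := by
        unfold pvSplitTail; simp
      have s2 : pvSplitTail ('/' :: a) = pvSplit a := by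
        unfold pvSplitTail; simp
      rw [t1, t2, s1, s2, ih]
      simp
    · rw [pvSplit_eq_cons (c :: (a ++ '/' :: b)), pvSplit_eq_cons (c :: a)]
      have t1 : (c :: (a ++ '/' :: b)).takeWhile (fun x => x ≠ '/') =
          c :: (a ++ '/' :: b).takeWhile (fun x => x ≠ '/') := by simp [hc]
      have t2 : (c :: a).takeWhile (fun x => x ≠ '/') =
          c :: a.takeWhile (fun x => x ≠ '/') := by simp [hc]
      have s1 : pvSplitTail (c :: (a ++ '/' :: b)) = pvSplitTail (a ++ '/' :: b) := by
        unfold pvSplitTail; simp [hc]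
      have s2 : pvSplitTail (c :: a) = pvSplitTail a := by
        unfold pvSplitTail; simp [hc]
      rw [t1, t2, s1, s2]
      rw [pvSplit_eq_cons (a ++ '/' :: b), pvSplit_eq_cons a] at ih
      simp only [List.cons_append] at ih
      injection ih with h5 h6
      rw [h5, h6]
      simp

-- A's port, rewritten as join of the normalized split
lemma pv_go_spec (fuel : Nat) : ∀ (l cur : List Char) (acc : List (List Char)),
    l.length < fuel →
    PySem.Chars.splitOn.go ['/'] fuel l cur acc =
      acc.reverse ++ (cur.reverse ++ l.takeWhile (fun c => c ≠ '/')) :: pvSplitTail l := by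
  induction fuel with
  | zero => intro l cur acc h; omega
  | succ fuel ih =>
    intro l cur acc h
    cases l with
    | nil => simp [PySem.Chars.splitOn.go, pvSplitTail]
    | cons c rest =>
      rw [PySem.Chars.splitOn.go]
      by_cases hc : c = '/'
      · subst hc
        have hpre : List.isPrefixOf ['/'] ('/' :: rest) = true := by
          simp [List.isPrefixOf]
        rw [if_pos hpre]
        have hdrop : List.drop (['/'] : List Char).length ('/' :: rest) = rest := rfl
        rw [hdrop, ih _ _ _ (by simp at h; omega)]
        have h1 : ('/' :: rest).takeWhile (fun c => c ≠ '/') = [] := by simp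
        have h2 : pvSplitTail ('/' :: rest) = pvSplit rest := by
          unfold pvSplitTail; simp
        rw [h1, h2, pvSplit_eq_cons]
        simp
      · have hpre : List.isPrefixOf ['/'] (c :: rest) = false := by
          simp [List.isPrefixOf]
          intro hh
          exact hc hh.symm
        rw [if_neg (by simp [hpre])]
        rw [ih _ _ _ (by simp at h; omega)]
        have h1 : (c :: rest).takeWhile (fun c => c ≠ '/') =
            c :: rest.takeWhile (fun c => c ≠ '/') := by simp [hc]
        have h2 : pvSplitTail (c :: rest) = pvSplitTail rest := by
          unfold pvSplitTail; simp [hc]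
        rw [h1, h2]
        simp

lemma pv_splitOn_eq (cs : List Char) :
    PySem.Chars.splitOn cs ['/'] = pvSplit cs := by
  rw [PySem.Chars.splitOn, pv_go_spec (cs.length + 1) cs [] [] (by omega), pvSplit_eq_cons]
  simp

lemma pv_foldl_eq_map (parts : List (List Char)) (acc : List (List Char)) :
    parts.foldl
      (fun acc part =>
        if PySem.Chars.startswith part ['{'] && PySem.Chars.endswith part ['}'] then
          acc ++ ["{param}".toList]
        else
          acc ++ [part]) acc = acc ++ parts.map pvNormB := by
  induction parts generalizing acc with
  | nil => simp
  | cons p t ih =>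
    simp only [List.foldl_cons, List.map_cons]
    by_cases hb : (PySem.Chars.startswith p ['{'] && PySem.Chars.endswith p ['}']) = true
    · rw [if_pos hb, ih]
      have hn : pvNormB p = "{param}".toList := by rw [pvNormB, if_pos hb]
      rw [hn]; simp
    · rw [if_neg hb, ih]
      have hn : pvNormB p = p := by rw [pvNormB, if_neg hb]
      rw [hn]; simp

lemma pv_join_append_singleton (l : List (List Char)) (x : List Char) (h : l ≠ []) :
    PySem.Chars.join ['/'] (l ++ [x]) = PySem.Chars.join ['/'] l ++ '/' :: x := by
  induction l with
  | nil => exact absurd rfl h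
  | cons a t ih =>
    cases t with
    | nil => simp [PySem.Chars.join_cons_cons, PySem.Chars.join_singleton]
    | cons b u =>
      have ihh : PySem.Chars.join ['/'] (b :: (u ++ [x])) =
          PySem.Chars.join ['/'] (b :: u) ++ '/' :: x := ih (by simp)
      show PySem.Chars.join ['/'] (a :: b :: (u ++ [x])) = _
      rw [PySem.Chars.join_cons_cons, ihh, PySem.Chars.join_cons_cons]
      simp

-- B's loop invariant: alt_go rest out = '/'.join(map norm (split rest)) ++ out
lemma pv_alt_go_spec (n : Nat) : ∀ (rest : List Char), rest.length ≤ n → ∀ (out : List Char),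
    get_base_path_py_alt_go rest out =
      PySem.Chars.join ['/'] ((pvSplit rest).map pvNormB) ++ out := by
  induction n with
  | zero =>
    intro rest hlen out
    have hnil : rest = [] := by cases rest <;> simp_all
    subst hnil
    rw [get_base_path_py_alt_go.eq_def]
    split
    · rw [pvSplit_no_slash [] (by simp)]
      simp [PySem.Chars.join_singleton]
    · simp_all
  | succ n ih =>
    intro rest hlen out
    rw [get_base_path_py_alt_go.eq_def]
    split
    · rename_i hdw
      have hns : '/' ∉ rest := by
        intro hx
        have := List.dropWhile_eq_nil_iff.1 hdw '/' (List.mem_reverse.mpr hx)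
        simp at this
      rw [pvSplit_no_slash rest hns]
      simp [PySem.Chars.join_singleton]
    · rename_i d t hdw
      have hdslash : d = '/' := by
        have h0 := List.head?_dropWhile_not (fun c => decide (c ≠ '/')) rest.reverse
        rw [hdw] at h0
        simpa using h0
      have hdec : rest.reverse = rest.reverse.takeWhile (fun c => c ≠ '/') ++ d :: t := by
        conv_lhs => rw [← List.takeWhile_append_dropWhile
          (p := fun c => decide (c ≠ '/')) (l := rest.reverse)]
        rw [hdw]
      have hrest : rest = t.reverse ++ '/' ::
          (rest.reverse.takeWhile (fun c => c ≠ '/')).reverse := by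
        have h2 := congrArg List.reverse hdec
        rw [List.reverse_reverse] at h2
        conv_lhs => rw [h2]
        rw [hdslash]
        simp
      have hseg_no : '/' ∉ (rest.reverse.takeWhile (fun c => c ≠ '/')).reverse := by
        intro hx
        rw [List.mem_reverse] at hx
        have := List.mem_takeWhile_imp hx
        simp at this
      have hlen' : t.reverse.length ≤ n := by
        have hlr := congrArg List.length hrest
        simp only [List.length_append, List.length_cons, List.length_reverse] at hlr
        simp only [List.length_reverse]
        omega
      rw [ih t.reverse hlen']
      conv_rhs => rw [hrest]
      rw [pvSplit_append, List.map_append, pvSplit_no_slash _ hseg_no]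
      rw [List.map_singleton, pv_join_append_singleton _ _ (by
        intro hc
        exact pvSplit_ne_nil t.reverse (List.map_eq_nil_iff.1 hc))]
      simp

-- ===== VERDICT =====
theorem get_base_path_py_spec : Claim_equal_get_base_path_py := by
  intro path _
  show get_base_path_py path = get_base_path_py_alt path
  rw [get_base_path_py, get_base_path_py_alt]
  rw [pv_splitOn_eq, pv_foldl_eq_map,
      pv_alt_go_spec path.toList.length path.toList (le_refl _) []]
  simp
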